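-- pv_equiv track=rewrite | github.com/ExecutorKarthan/Instructional-Code | Binary Converter.py | generate_binary
-- ===== SOURCE A (Python) =====
-- def generate_binary(val, power):
--     if power == 0:
--         return str(val)
--     else:
--         temp_val = val - 2**power
--         if temp_val > 0:
--             val = temp_val
--             return "1" + generate_binary(val, power-1)
--         else:
--             return "0" + generate_binary(val, power-1)
-- ===== SOURCE B (Python) =====
-- def generate_binary(val, power):
--     result = ""
--     while power > 0:
--         temp_val = val - 2**power
--         if temp_val > 0:
--             val = temp_val
--             result += "1"
--         else:
--             result += "0"
--         power -= 1
--     return result + str(val)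
-- ===== Notes on version B (the rewrite author's own statement) =====
-- stated objective: simpler
-- what changed: Replaced the recursion with an iterative while-loop that appends one digit per step to an accumulator string and returns result + str(val) when power reaches 0.
import Mathlib
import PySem

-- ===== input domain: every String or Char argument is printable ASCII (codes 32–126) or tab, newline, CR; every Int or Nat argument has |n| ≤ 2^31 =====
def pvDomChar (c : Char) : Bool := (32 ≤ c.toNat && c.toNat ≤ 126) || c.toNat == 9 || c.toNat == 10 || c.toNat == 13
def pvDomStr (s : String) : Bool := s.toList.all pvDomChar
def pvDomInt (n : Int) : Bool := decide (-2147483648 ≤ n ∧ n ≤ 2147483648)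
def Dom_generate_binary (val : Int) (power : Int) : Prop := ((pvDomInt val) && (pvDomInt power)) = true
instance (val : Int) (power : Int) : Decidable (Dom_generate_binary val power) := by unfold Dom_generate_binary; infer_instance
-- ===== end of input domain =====

-- B replaces the recursion by an iterative while-loop with an accumulator string (objective: simpler decomposition).
-- ===== PORT A =====
def generate_binary (val : Int) (power : Int) : String :=
  if power = 0 then PySem.Int.toStr val
  else if power < 0 then ""  -- Python recurses forever here (RecursionError); arbitrary value, excluded by Pre_
  else
    let temp_val := val - 2 ^ power.toNat
    if temp_val > 0 then "1" ++ generate_binary temp_val (power - 1)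
    else "0" ++ generate_binary val (power - 1)
termination_by power.toNat
decreasing_by all_goals omega

-- ===== PORT B =====
-- the while-loop of Source B, as tail recursion over the loop state (val, power, result)
def genBinLoop (val : Int) (power : Int) (result : String) : String :=
  if power > 0 then
    let temp_val := val - 2 ^ power.toNat
    if temp_val > 0 then genBinLoop temp_val (power - 1) (result ++ "1")
    else genBinLoop val (power - 1) (result ++ "0")
  else result ++ PySem.Int.toStr val
termination_by power.toNat
decreasing_by all_goals omega

def generate_binary_alt (val : Int) (power : Int) : String :=
  genBinLoop val power ""

-- ===== PRECONDITION & SPEC =====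
-- Pre_ excludes power < 0, on which Python A raises RecursionError (no base case is reached).
def Pre_generate_binary (val : Int) (power : Int) : Prop := 0 ≤ power
instance (val : Int) (power : Int) : Decidable (Pre_generate_binary val power) := by unfold Pre_generate_binary; infer_instance
def pvWitness_generate_binary : Int × Int := (5, 3)

def Spec_generate_binary (val : Int) (power : Int) (out : String) : Prop := out = generate_binary_alt val power
instance (val : Int) (power : Int) (out : String) : Decidable (Spec_generate_binary val power out) := by unfold Spec_generate_binary; infer_instance

-- ===== CLAIM (what is proved, stated in full; the proofs are below) =====
def Claim_equal_generate_binary : Prop := ∀ (val : Int) (power : Int), Dom_generate_binary val power → Pre_generate_binary val power → Spec_generate_binary val power (generate_binary val power)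

-- ===== LEMMAS AND PROOFS =====
-- loop invariant: the accumulator is a prefix, the loop computes A's recursion
theorem genBinLoop_eq (n : Nat) : ∀ (val : Int) (result : String),
    genBinLoop val (n : Int) result = result ++ generate_binary val n := by
  induction n with
  | zero => intro val result; rw [genBinLoop, generate_binary]; simp
  | succ k ih =>
    intro val result
    rw [genBinLoop, generate_binary]
    have ht : ((k : Int) + 1).toNat = k + 1 := by omega
    have hs : ((k : Int) + 1 - 1) = (k : Int) := by omega
    simp only [Int.natCast_succ] at *
    split_ifs <;> simp [ht, hs, ih, String.append_assoc] <;> omega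

theorem generate_binary_spec : Claim_equal_generate_binary := by
  intro val power _ hpre
  unfold Spec_generate_binary generate_binary_alt
  have h : power = ((power.toNat : Nat) : Int) := by
    unfold Pre_generate_binary at hpre; omega
  rw [h, genBinLoop_eq]
  simp
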